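-- pv_equiv track=rewrite | github.com/CCChenhao997/LeetCode | 剑指Offer/面试题4.替换空格.py | replaceSpace4
-- ===== SOURCE A (Python) =====
-- def replaceSpace4(s):
--     tempstr = ''
--     if type(s) != str:
--         return
--     for c in s:
--         if c == ' ':
--             tempstr += '%20'
--         else:
--             tempstr += c
--     return tempstr
-- ===== SOURCE B (Python) =====
-- def replaceSpace4(s):
--     if type(s) != str:
--         return
--     return '%20'.join(s.split(' '))
-- ===== Notes on version B (the rewrite author's own statement) =====
-- stated objective: idiomatic
-- what changed: Replaces the character-by-character string-accumulation loop with a single split-on-space / join-with-%20 expression.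
import Mathlib
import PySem

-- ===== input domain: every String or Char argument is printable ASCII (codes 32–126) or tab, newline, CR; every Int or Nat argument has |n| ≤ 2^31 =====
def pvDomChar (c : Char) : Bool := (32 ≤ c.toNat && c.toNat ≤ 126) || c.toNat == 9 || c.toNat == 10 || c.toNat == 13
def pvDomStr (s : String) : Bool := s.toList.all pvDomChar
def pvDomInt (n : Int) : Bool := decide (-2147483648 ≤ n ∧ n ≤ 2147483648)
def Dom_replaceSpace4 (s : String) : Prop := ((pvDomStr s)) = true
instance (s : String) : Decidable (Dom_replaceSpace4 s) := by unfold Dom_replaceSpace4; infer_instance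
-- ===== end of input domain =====

-- B replaces A's character-by-character accumulation loop with split(' ')/join('%20') (idiomatic; return value only —
-- Python A's `if type(s) != str: return` guard is unreachable under the String signature and is kept in Source B).

-- ===== PORT A =====
-- the loop `for c in s: tempstr += '%20' if c == ' ' else c`
def replaceSpace4 (s : String) : String :=
  String.ofList (s.toList.foldl
    (fun tempstr c => if c == ' ' then tempstr ++ "%20".toList else tempstr ++ [c]) [])

-- ===== PORT B =====
-- `'%20'.join(s.split(' '))`
def replaceSpace4_alt (s : String) : String :=
  String.ofList (PySem.Chars.join "%20".toList (PySem.Chars.splitOn s.toList [' ']))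

-- ===== PRECONDITION & SPEC =====
def Spec_replaceSpace4 (s : String) (out : String) : Prop := out = replaceSpace4_alt s
instance (s : String) (out : String) : Decidable (Spec_replaceSpace4 s out) := by unfold Spec_replaceSpace4; infer_instance

-- ===== CLAIM (what is proved, stated in full; the proofs are below) =====
def Claim_equal_replaceSpace4 : Prop := ∀ (s : String), Dom_replaceSpace4 s → Spec_replaceSpace4 s (replaceSpace4 s)

-- ===== LEMMAS AND PROOFS =====

-- join over a snoc: the separator appears iff the prefix list is nonempty
theorem pv_join_snoc (m : List Char) (xs : List (List Char)) (y : List Char) :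
    PySem.Chars.join m (xs ++ [y])
      = PySem.Chars.join m xs ++ (if xs = [] then [] else m) ++ y := by
  induction xs with
  | nil => simp [PySem.Chars.join_nil, PySem.Chars.join_singleton]
  | cons x xs ih =>
    cases xs with
    | nil => simp [PySem.Chars.join_cons_cons, PySem.Chars.join_singleton]
    | cons z zs =>
      rw [List.cons_append] at ih
      simp only [List.cons_append, PySem.Chars.join_cons_cons]
      rw [ih]
      simp [List.append_assoc]

-- characterisation of splitOn.go (single-char separator ' ') joined back with m
theorem pv_go_join (m : List Char) (fuel : Nat) (l cur : List Char) (acc : List (List Char))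
    (h : l.length < fuel) :
    PySem.Chars.join m (PySem.Chars.splitOn.go [' '] fuel l cur acc)
      = PySem.Chars.join m acc.reverse ++ (if acc = [] then [] else m) ++ cur.reverse
        ++ l.flatMap (fun c => if c = ' ' then m else [c]) := by
  induction fuel generalizing l cur acc with
  | zero => omega
  | succ f ih =>
    cases l with
    | nil =>
      have : PySem.Chars.splitOn.go [' '] (f+1) [] cur acc = (cur.reverse :: acc).reverse := by
        simp [PySem.Chars.splitOn.go]
      rw [this]
      simp [List.reverse_cons, pv_join_snoc, List.reverse_eq_nil_iff, List.append_assoc]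
    | cons c rest =>
      by_cases hc : c = ' '
      · subst hc
        have hgo : PySem.Chars.splitOn.go [' '] (f+1) (' ' :: rest) cur acc
            = PySem.Chars.splitOn.go [' '] f rest [] (cur.reverse :: acc) := by
          simp only [PySem.Chars.splitOn.go]
          split_ifs with hp
          · simp
          · simp [List.isPrefixOf] at hp
        rw [hgo, ih rest [] (cur.reverse :: acc) (by simpa using Nat.lt_of_succ_lt_succ h)]
        simp only [List.reverse_cons, pv_join_snoc, List.reverse_eq_nil_iff, List.flatMap_cons]
        simp [List.append_assoc]
      · have hgo : PySem.Chars.splitOn.go [' '] (f+1) (c :: rest) cur acc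
            = PySem.Chars.splitOn.go [' '] f rest (c :: cur) acc := by
          simp only [PySem.Chars.splitOn.go]
          split_ifs with hp
          · simp [List.isPrefixOf] at hp; exact absurd hp.symm hc
          · rfl
        rw [hgo, ih rest (c :: cur) acc (by simpa using Nat.lt_of_succ_lt_succ h)]
        simp [List.flatMap_cons, hc, List.append_assoc]

-- A's accumulation loop is the same flatMap
theorem pv_foldl_flatMap (l acc : List Char) :
    l.foldl (fun tempstr c => if c == ' ' then tempstr ++ "%20".toList else tempstr ++ [c]) acc
      = acc ++ l.flatMap (fun c => if c = ' ' then "%20".toList else [c]) := by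
  induction l generalizing acc with
  | nil => simp
  | cons c rest ih =>
    simp only [List.foldl_cons]
    by_cases hc : c = ' '
    · rw [if_pos (by simp [hc]), ih]; simp [hc]
    · rw [if_neg (by simp [hc]), ih]; simp [hc]

-- ===== VERDICT (by name: the statement is the Claim_ definition above) =====
theorem replaceSpace4_spec : Claim_equal_replaceSpace4 := by
  intro s _
  show String.ofList _ = String.ofList _
  rw [pv_foldl_flatMap]
  unfold PySem.Chars.splitOn
  rw [pv_go_join _ _ _ _ _ (Nat.lt_succ_self _)]
  simp [PySem.Chars.join_nil]
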